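-- pv_equiv track=rewrite | github.com/thegrublord/BalatroCartemenPrototyping | game/rules.py | _is_shortcut_straight
-- ===== SOURCE A (Python) =====
-- from typing import List, Tuple
-- from itertools import combinations
--
-- def _is_shortcut_straight(ranks: List[int]) -> bool:
--     """Shortcut straight: any 4 cards can form a sequence with one optional gap."""
--     unique_ranks = set(ranks)
--     if 14 in unique_ranks:
--         unique_ranks.add(1)  # Ace-low compatibility
--
--     ordered = sorted(unique_ranks)
--     if len(ordered) < 4:
--         return False
--
--     for combo in combinations(ordered, 4):
--         if combo[-1] - combo[0] <= 4:
--             return True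
--     return False
-- ===== SOURCE B (Python) =====
-- def _is_shortcut_straight(ranks):
--     """Shortcut straight: any 4 cards can form a sequence with one optional gap."""
--     unique_ranks = set(ranks)
--     if 14 in unique_ranks:
--         unique_ranks.add(1)  # Ace-low compatibility
--     ordered = sorted(unique_ranks)
--     return any(ordered[i + 3] - ordered[i] <= 4 for i in range(len(ordered) - 3))
-- ===== Notes on version B (the rewrite author's own statement) =====
-- stated objective: faster
-- what changed: Replaced the O(n^4) scan of all 4-element combinations with a single sliding-window pass over the sorted unique ranks checking ordered[i+3]-ordered[i] <= 4.
import Mathlib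
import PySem

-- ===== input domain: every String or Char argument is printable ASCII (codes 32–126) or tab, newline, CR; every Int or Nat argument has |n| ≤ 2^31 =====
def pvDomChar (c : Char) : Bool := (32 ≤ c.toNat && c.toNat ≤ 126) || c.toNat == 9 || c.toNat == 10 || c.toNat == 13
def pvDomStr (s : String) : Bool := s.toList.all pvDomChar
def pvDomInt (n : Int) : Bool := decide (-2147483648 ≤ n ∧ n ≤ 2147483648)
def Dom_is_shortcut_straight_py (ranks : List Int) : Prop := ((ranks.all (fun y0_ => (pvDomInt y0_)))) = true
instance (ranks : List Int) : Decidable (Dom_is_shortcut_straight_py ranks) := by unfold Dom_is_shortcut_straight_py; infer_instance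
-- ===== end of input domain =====

-- B replaces A's scan of all 4-element combinations by one sliding-window pass over the sorted unique ranks (asymptotically faster).

-- ===== PORT A =====
-- helper: itertools.combinations(xs, n), combinations listed in itertools' order
def pyCombos : Nat → List Int → List (List Int)
  | 0, _ => [[]]
  | _ + 1, [] => []
  | n + 1, x :: xs => ((pyCombos n xs).map (x :: ·)) ++ pyCombos (n + 1) xs

def is_shortcut_straight_py (ranks : List Int) : Bool :=
  let uniqueRanks0 := PySem.Set.ofList ranks
  let uniqueRanks := if PySem.Set.contains uniqueRanks0 14 then PySem.Set.add uniqueRanks0 1 else uniqueRanks0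
  let ordered := PySem.List.sorted uniqueRanks (fun x => x) false
  if ordered.length < 4 then
    false
  else
    -- 'for combo in …: if …: return True / return False' = any; combo[-1], combo[0] via pyGetD (each combo has length 4, so in range)
    (pyCombos 4 ordered).any (fun combo =>
      decide (PySem.List.pyGetD combo (-1) 0 - PySem.List.pyGetD combo 0 0 ≤ 4))

-- ===== PORT B =====
def is_shortcut_straight_py_alt (ranks : List Int) : Bool :=
  let uniqueRanks0 := PySem.Set.ofList ranks
  let uniqueRanks := if PySem.Set.contains uniqueRanks0 14 then PySem.Set.add uniqueRanks0 1 else uniqueRanks0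
  let ordered := PySem.List.sorted uniqueRanks (fun x => x) false
  (PySem.List.pyRange 0 ((ordered.length : Int) - 3) 1).any (fun i =>
    decide (PySem.List.pyGetD ordered (i + 3) 0 - PySem.List.pyGetD ordered i 0 ≤ 4))

-- ===== PRECONDITION & SPEC =====
def Spec_is_shortcut_straight_py (ranks : List Int) (out : Bool) : Prop := out = is_shortcut_straight_py_alt ranks
instance (ranks : List Int) (out : Bool) : Decidable (Spec_is_shortcut_straight_py ranks out) := by unfold Spec_is_shortcut_straight_py; infer_instance

-- ===== CLAIM (what is proved, stated in full; the proofs are below) =====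
def Claim_equal_is_shortcut_straight_py : Prop := ∀ (ranks : List Int), Dom_is_shortcut_straight_py ranks → Spec_is_shortcut_straight_py ranks (is_shortcut_straight_py ranks)

-- ===== LEMMAS AND PROOFS =====

-- membership in pyCombos = sublists of the given length
theorem mem_pyCombos (n : Nat) (xs c : List Int) :
    c ∈ pyCombos n xs ↔ c.Sublist xs ∧ c.length = n := by
  induction xs generalizing n c with
  | nil =>
    cases n with
    | zero =>
      constructor
      · intro hc
        have hce : c = [] := by simpa [pyCombos] using hc
        subst hce; exact ⟨List.Sublist.refl _, rfl⟩
      · rintro ⟨hs, _⟩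
        have hce : c = [] := List.sublist_nil.mp hs
        simp [pyCombos, hce]
    | succ n =>
      constructor
      · intro hc; exact absurd hc (by simp [pyCombos])
      · rintro ⟨hs, hl⟩
        have hce : c = [] := List.sublist_nil.mp hs
        subst hce; simp at hl
  | cons x xs ih =>
    cases n with
    | zero =>
      constructor
      · intro hc
        have hce : c = [] := by simpa [pyCombos] using hc
        subst hce; exact ⟨List.nil_sublist _, rfl⟩
      · rintro ⟨_, hl⟩
        have hce : c = [] := List.length_eq_zero_iff.mp hl
        simp [pyCombos, hce]
    | succ n =>
      simp only [pyCombos, List.mem_append, List.mem_map, ih]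
      constructor
      · rintro (⟨d, ⟨hd, hl⟩, rfl⟩ | ⟨hs, hl⟩)
        · exact ⟨List.Sublist.cons₂ x hd, by simp [hl]⟩
        · exact ⟨hs.cons x, hl⟩
      · rintro ⟨hs, hl⟩
        rcases List.sublist_cons_iff.mp hs with h | ⟨r, rfl, hr⟩
        · exact Or.inr ⟨h, hl⟩
        · exact Or.inl ⟨r, ⟨hr, by simpa using hl⟩, rfl⟩

-- pyGetD at a Nat index in range is getElem
theorem pyGetD_nat (xs : List Int) (k : Nat) (hk : k < xs.length) (d : Int) :
    PySem.List.pyGetD xs (k : Int) d = xs[k] := by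
  rw [PySem.List.pyGetD_eq_getElem xs d (by omega) (by exact_mod_cast hk)]
  simp

-- pyGetD at index 0 of a nonempty list
theorem pyGetD_zero (xs : List Int) (h : 0 < xs.length) (d : Int) :
    PySem.List.pyGetD xs 0 d = xs[0] := by
  have := pyGetD_nat xs 0 h d
  simpa using this

-- pyGetD at index -1 of a length-4 list is its last element
theorem pyGetD_neg_one_len4 (w : List Int) (hw : w.length = 4) (d : Int) :
    PySem.List.pyGetD w (-1) d = w[3]'(by omega) := by
  rcases w with _ | ⟨a, w⟩; · simp at hw
  rcases w with _ | ⟨b, w⟩; · simp at hw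
  rcases w with _ | ⟨c, w⟩; · simp at hw
  rcases w with _ | ⟨e, w⟩; · simp at hw
  have hwe : w = [] := by simpa using hw
  subst hwe
  simp [PySem.List.pyGetD, PySem.List.pyGet?, PySem.List.pyIdx?]

-- the core equivalence: on any index-monotone list, 'some 4-combination spans ≤ 4' = 'some window of 4 consecutive entries spans ≤ 4'
theorem window_core (o : List Int)
    (hmono : ∀ (p q : Nat) (hpq : p ≤ q) (hq : q < o.length), o[p]'(lt_of_le_of_lt hpq hq) ≤ o[q]) :
    (if o.length < 4 then
      false
     else
      (pyCombos 4 o).any (fun combo =>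
        decide (PySem.List.pyGetD combo (-1) 0 - PySem.List.pyGetD combo 0 0 ≤ 4))) =
    (PySem.List.pyRange 0 ((o.length : Int) - 3) 1).any (fun i =>
      decide (PySem.List.pyGetD o (i + 3) 0 - PySem.List.pyGetD o i 0 ≤ 4)) := by
  by_cases h4 : o.length < 4
  · rw [if_pos h4, PySem.List.pyRange_one_eq_nil (by omega)]
    simp
  · rw [if_neg h4, Bool.eq_iff_iff]
    simp only [List.any_eq_true, decide_eq_true_eq]
    constructor
    · rintro ⟨c, hc, hcond⟩
      obtain ⟨hs, hl⟩ := (mem_pyCombos 4 o c).mp hc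
      obtain ⟨is, rfl, hp⟩ := List.sublist_eq_map_getElem hs
      rcases is with _ | ⟨i0, _ | ⟨i1, _ | ⟨i2, _ | ⟨i3, t⟩⟩⟩⟩ <;> simp at hl
      have hte : t = [] := by simpa using hl
      subst hte
      simp only [List.map_cons, List.map_nil] at hcond
      obtain ⟨h0, hp1⟩ := List.pairwise_cons.mp hp
      obtain ⟨h1, hp2⟩ := List.pairwise_cons.mp hp1
      obtain ⟨h2, -⟩ := List.pairwise_cons.mp hp2
      have h01 : (i0 : Nat) < (i1 : Nat) := Fin.lt_def.mp (h0 i1 (by simp))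
      have h12 : (i1 : Nat) < (i2 : Nat) := Fin.lt_def.mp (h1 i2 (by simp))
      have h23 : (i2 : Nat) < (i3 : Nat) := Fin.lt_def.mp (h2 i3 (by simp))
      have hi3 : (i3 : Nat) < o.length := i3.isLt
      have hcond' : o[(i3 : Nat)]'hi3 - o[(i0 : Nat)]'(by omega) ≤ 4 := by
        simpa [PySem.List.pyGetD, PySem.List.pyGet?, PySem.List.pyIdx?] using hcond
      have hk3 : (i0 : Nat) + 3 < o.length := by omega
      refine ⟨((i0 : Nat) : Int), ?_, ?_⟩
      · rw [PySem.List.mem_pyRange_one]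
        constructor
        · omega
        · omega
      · have hc3 : (((i0 : Nat) : Int) + 3) = (((i0 : Nat) + 3 : Nat) : Int) := by push_cast; ring
        rw [hc3, pyGetD_nat o _ hk3 0, pyGetD_nat o _ (by omega) 0]
        have hmo := hmono ((i0 : Nat) + 3) (i3 : Nat) (by omega) hi3
        omega
    · rintro ⟨i, hi, hcond⟩
      rw [PySem.List.mem_pyRange_one] at hi
      obtain ⟨k, rfl⟩ : ∃ k : Nat, i = (k : Int) := ⟨i.toNat, by omega⟩
      have hk3 : k + 3 < o.length := by omega
      have hc3 : (((k : Nat) : Int) + 3) = ((k + 3 : Nat) : Int) := by push_cast; ring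
      rw [hc3, pyGetD_nat o _ hk3 0, pyGetD_nat o _ (by omega) 0] at hcond
      have hw : ((o.drop k).take 4).length = 4 := by
        simp only [List.length_take, List.length_drop]
        omega
      refine ⟨(o.drop k).take 4, ?_, ?_⟩
      · exact (mem_pyCombos 4 o _).mpr
          ⟨(List.take_sublist _ _).trans (List.drop_sublist _ _), hw⟩
      · rw [pyGetD_neg_one_len4 _ hw 0, pyGetD_zero _ (by omega) 0]
        have e3 : ((o.drop k).take 4)[3]'(by omega) = o[k + 3]'hk3 := by
          rw [List.getElem_take, List.getElem_drop]
        have e0 : ((o.drop k).take 4)[0]'(by omega) = o[k]'(by omega) := by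
          rw [List.getElem_take, List.getElem_drop]
          simp
        omega

-- ===== VERDICT (by name: the statement is the Claim_ definition above) =====
theorem is_shortcut_straight_py_spec : Claim_equal_is_shortcut_straight_py := by
  intro ranks _
  unfold Spec_is_shortcut_straight_py is_shortcut_straight_py is_shortcut_straight_py_alt
  exact window_core _ (fun p q hpq hq => PySem.List.sorted_id_getElem_mono _ hpq hq)
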